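-- pv_equiv track=rewrite | github.com/beansthelightkeeper/beansapplications | beansaiV4.py | duodecimal_gematria
-- ===== SOURCE A (Python) =====
-- def simple_gematria(word):
--     return sum(ord(c) - 64 for c in word.upper() if 'A' <= c <= 'Z')
--
-- def duodecimal_gematria(word):
--     val = simple_gematria(word)
--     base12_str = ''
--     while val:
--         digit = val % 12
--         base12_str = str(digit if digit < 10 else chr(65 + digit - 10)) + base12_str
--         val //= 12
--     return sum(int(d) if d.isdigit() else ord(d) - 55 for d in base12_str) if base12_str else 0
-- ===== SOURCE B (Python) =====
-- def simple_gematria(word):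
--     return sum(ord(c) - 64 for c in word.upper() if 'A' <= c <= 'Z')
--
-- def duodecimal_gematria(word):
--     val = simple_gematria(word)
--     total = 0
--     while val:
--         total += val % 12
--         val //= 12
--     return total
-- ===== Notes on version B (the rewrite author's own statement) =====
-- stated objective: simpler
-- what changed: B sums the base-12 digits directly in one integer accumulator (total += val % 12) instead of building a base-12 string character by character and then re-parsing every character back to a digit value.
import Mathlib
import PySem

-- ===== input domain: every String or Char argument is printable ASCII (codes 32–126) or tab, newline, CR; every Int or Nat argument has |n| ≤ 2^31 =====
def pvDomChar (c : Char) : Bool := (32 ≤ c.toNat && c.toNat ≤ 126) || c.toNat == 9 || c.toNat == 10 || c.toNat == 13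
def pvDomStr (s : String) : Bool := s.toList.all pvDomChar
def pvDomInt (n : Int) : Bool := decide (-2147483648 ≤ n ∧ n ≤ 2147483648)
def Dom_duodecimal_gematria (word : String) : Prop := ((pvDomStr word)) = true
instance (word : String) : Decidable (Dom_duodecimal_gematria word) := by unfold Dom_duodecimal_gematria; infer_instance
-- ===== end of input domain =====

-- B sums the base-12 digits directly in one integer accumulator instead of
-- building a base-12 string and re-parsing it; objective: simpler.


-- ===== PORT A =====
-- simple_gematria (shared helper of A and B, identical in both Pythons)
def simpleGematria (word : String) : Int :=
  ((PySem.Str.upper word).toList.filter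
      (fun c => decide ('A' ≤ c) && decide (c ≤ 'Z'))).foldl
    (fun acc c => acc + ((c.toNat : Int) - 64)) 0

-- one char of A's base-12 string for digit d (str(digit) if digit < 10 else chr(65+digit-10))
def pvDigitChars (digit : Int) : List Char :=
  if digit < 10 then PySem.Int.toChars digit else [Char.ofNat (65 + digit - 10).toNat]

-- A's while loop, building the base-12 character list front-to-back by prepending.
-- Guard `0 < val`: Python's `while val:`; val is never negative here (a negative val
-- would make the Python loop diverge), so the guard only makes the recursion total.
def pvALoop (val : Int) (acc : List Char) : List Char :=
  if h : 0 < val then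
    let digit := PySem.Int.mod val 12
    pvALoop (PySem.Int.floordiv val 12) (pvDigitChars digit ++ acc)
  else acc
termination_by val.toNat
decreasing_by
  rw [PySem.Int.floordiv_eq_ediv_of_pos (by norm_num : (0:Int) < 12)]
  omega

-- int(d) if d.isdigit() else ord(d) - 55   (int(d) is guarded by isdigit, so getD 0 is never taken)
def pvParse (d : Char) : Int :=
  if PySem.Chars.isdigit d then (PySem.Int.ofChars? [d]).getD 0 else (d.toNat : Int) - 55

def duodecimal_gematria (word : String) : Int :=
  let val := simpleGematria word
  let base12 := pvALoop val []
  if base12.isEmpty then 0 else (base12.map pvParse).sum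

-- ===== PORT B =====
-- B's while loop: one integer accumulator, no string.
def pvBLoop (val : Int) (total : Int) : Int :=
  if h : 0 < val then
    pvBLoop (PySem.Int.floordiv val 12) (total + PySem.Int.mod val 12)
  else total
termination_by val.toNat
decreasing_by
  rw [PySem.Int.floordiv_eq_ediv_of_pos (by norm_num : (0:Int) < 12)]
  omega

def duodecimal_gematria_alt (word : String) : Int :=
  pvBLoop (simpleGematria word) 0

-- ===== PRECONDITION & SPEC =====
def Spec_duodecimal_gematria (word : String) (out : Int) : Prop := out = duodecimal_gematria_alt word
instance (word : String) (out : Int) : Decidable (Spec_duodecimal_gematria word out) := by unfold Spec_duodecimal_gematria; infer_instance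

-- ===== CLAIM (what is proved, stated in full; the proofs are below) =====
def Claim_equal_duodecimal_gematria : Prop := ∀ (word : String), Dom_duodecimal_gematria word → Spec_duodecimal_gematria word (duodecimal_gematria word)

-- ===== LEMMAS AND PROOFS =====

-- parsing A's single digit character gives back the digit value
lemma parse_digitChars {d : Int} (h0 : 0 ≤ d) (h12 : d < 12) :
    ((pvDigitChars d).map pvParse).sum = d := by
  interval_cases d <;> decide

-- the gematria value is nonnegative
lemma foldl_le_of_terms_nonneg :
    ∀ (l : List Char), (∀ c ∈ l, (64 : Int) ≤ (c.toNat : Int)) →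
    ∀ (acc : Int), acc ≤ l.foldl (fun acc c => acc + ((c.toNat : Int) - 64)) acc
  | [], _, acc => le_refl _
  | c :: l, hall, acc => by
    simp only [List.foldl_cons]
    have h1 : (64 : Int) ≤ (c.toNat : Int) := hall c (List.mem_cons_self ..)
    have h2 := foldl_le_of_terms_nonneg l (fun x hx => hall x (List.mem_cons_of_mem _ hx))
      (acc + ((c.toNat : Int) - 64))
    omega

lemma simpleGematria_nonneg (word : String) : 0 ≤ simpleGematria word := by
  unfold simpleGematria
  apply foldl_le_of_terms_nonneg
  intro c hc
  simp only [List.mem_filter, Bool.and_eq_true, decide_eq_true_eq] at hc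
  have h := hc.2.1
  rw [Char.le_def] at h
  have h2 : (65 : Nat) ≤ c.toNat := UInt32.le_iff_toNat_le.mp h
  omega

-- loop invariant: the parsed sum of A's string equals B's running total
lemma loop_sum (n : Nat) : ∀ (val : Int) (acc : List Char), 0 ≤ val → val.toNat = n →
    ((pvALoop val acc).map pvParse).sum = pvBLoop val ((acc.map pvParse).sum) := by
  induction n using Nat.strong_induction_on with
  | _ n ih =>
    intro val acc h0 hn
    by_cases h : 0 < val
    · rw [pvALoop, pvBLoop, dif_pos h, dif_pos h]
      have h12 : (0 : Int) < 12 := by norm_num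
      have hmod : PySem.Int.mod val 12 = val % 12 := PySem.Int.mod_eq_emod_of_pos h12
      have hd0 : 0 ≤ PySem.Int.mod val 12 := by rw [hmod]; exact Int.emod_nonneg val (by norm_num)
      have hd12 : PySem.Int.mod val 12 < 12 := by rw [hmod]; exact Int.emod_lt_of_pos val h12
      have hdiv : PySem.Int.floordiv val 12 = val / 12 := PySem.Int.floordiv_eq_ediv_of_pos h12
      have hq0 : 0 ≤ PySem.Int.floordiv val 12 := by rw [hdiv]; positivity
      have hlt : (PySem.Int.floordiv val 12).toNat < n := by rw [hdiv]; omega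
      rw [ih _ hlt _ _ hq0 rfl]
      congr 1
      simp only [List.map_append, List.sum_append, parse_digitChars hd0 hd12]
      ring
    · rw [pvALoop, pvBLoop, dif_neg h, dif_neg h]

-- ===== VERDICT (by name: the statement is the Claim_ definition above) =====
theorem duodecimal_gematria_spec : Claim_equal_duodecimal_gematria := by
  intro word _
  unfold Spec_duodecimal_gematria duodecimal_gematria duodecimal_gematria_alt
  have hv := simpleGematria_nonneg word
  have h := loop_sum (simpleGematria word).toNat (simpleGematria word) [] hv rfl
  simp only [List.map_nil, List.sum_nil] at h
  by_cases he : (pvALoop (simpleGematria word) []).isEmpty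
  · simp only [he, if_true]
    rw [List.isEmpty_iff] at he
    rw [he] at h
    simpa using h
  · simp only [he]
    exact h
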